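-- pv_equiv track=rewrite | github.com/BertCalm/XO_OX-XOmnibus | Tools/xpn_velocity_zone_visualizer.py | find_overlaps
-- ===== SOURCE A (Python) =====
-- def find_overlaps(coverage: list[int]) -> list[tuple[int, int]]:
--     """Return list of (vel_start, vel_end) 1-based overlap spans."""
--     overlaps: list[tuple[int, int]] = []
--     in_ovl = False
--     ovl_start = 0
--     for i, c in enumerate(coverage):
--         vel = i + 1
--         if c >= 2 and not in_ovl:
--             in_ovl = True
--             ovl_start = vel
--         elif c < 2 and in_ovl:
--             overlaps.append((ovl_start, vel - 1))
--             in_ovl = False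
--     if in_ovl:
--         overlaps.append((ovl_start, 128))
--     return overlaps
-- ===== SOURCE B (Python) =====
-- def find_overlaps(coverage: list[int]) -> list[tuple[int, int]]:
--     """Return list of (vel_start, vel_end) 1-based overlap spans."""
--     n = len(coverage)
--     res: list[tuple[int, int]] = []
--     i = 0
--     while i < n:
--         if coverage[i] >= 2:
--             j = i
--             while j + 1 < n and coverage[j + 1] >= 2:
--                 j += 1
--             res.append((i + 1, 128 if j == n - 1 else j + 1))
--             i = j + 1
--         else:
--             i += 1
--     return res
-- ===== Notes on version B (the rewrite author's own statement) =====
-- stated objective: alternative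
-- what changed: Replaces A's boolean in-run flag state machine (one step per element with carried in_ovl/ovl_start state and a post-loop flush) by a run-finder: an outer scan that, on meeting a value >= 2, consumes the whole contiguous run with an inner scan and emits the span at once (closing a run that reaches the end at the literal 128, as the function's 128-bin purpose requires).
import Mathlib
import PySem

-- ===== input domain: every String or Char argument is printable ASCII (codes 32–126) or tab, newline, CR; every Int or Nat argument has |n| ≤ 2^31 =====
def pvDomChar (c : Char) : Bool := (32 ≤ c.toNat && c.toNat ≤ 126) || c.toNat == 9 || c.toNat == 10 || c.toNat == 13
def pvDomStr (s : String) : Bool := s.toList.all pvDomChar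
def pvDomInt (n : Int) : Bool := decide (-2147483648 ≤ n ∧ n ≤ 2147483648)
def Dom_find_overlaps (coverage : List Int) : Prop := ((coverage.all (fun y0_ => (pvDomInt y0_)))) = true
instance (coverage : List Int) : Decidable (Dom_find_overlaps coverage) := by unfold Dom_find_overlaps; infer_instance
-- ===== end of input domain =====

-- B replaces A's in-run flag state machine by a run-finder that consumes each contiguous >=2 run at once (alternative decomposition, same cost).


-- ===== PORT A =====
-- one step of A's for-loop: state = (overlaps, in_ovl, ovl_start)
def pvStepA (st : List (Int × Int) × Bool × Int) (p : Int × Int) : List (Int × Int) × Bool × Int :=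
  let vel := p.1 + 1
  if p.2 ≥ 2 ∧ st.2.1 = false then (st.1, true, vel)
  else if p.2 < 2 ∧ st.2.1 = true then (st.1 ++ [(st.2.2, vel - 1)], false, st.2.2)
  else st

def find_overlaps (coverage : List Int) : List (Int × Int) :=
  let st := (PySem.List.enumerate coverage).foldl pvStepA ([], false, 0)
  if st.2.1 = true then st.1 ++ [(st.2.2, 128)] else st.1

-- ===== PORT B =====
-- inner while loop of B: starting at last-known run index j, extend the run while the next value is >= 2
def pvConsume : Int → List Int → Int × List Int
  | j, [] => (j, [])
  | j, c :: rest => if c ≥ 2 then pvConsume (j + 1) rest else (j, c :: rest)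

theorem pvConsume_length_le : ∀ (j : Int) (xs : List Int), (pvConsume j xs).2.length ≤ xs.length := by
  intro j xs
  induction xs generalizing j with
  | nil => simp [pvConsume]
  | cons c rest ih =>
    simp only [pvConsume]
    split
    · exact Nat.le_trans (ih _) (Nat.le_succ _)
    · simp

-- outer while loop of B: i is the index of the head of the remaining list
def pvAltGo (n : Int) (i : Int) (xs : List Int) : List (Int × Int) :=
  match xs with
  | [] => []
  | c :: rest =>
    if c ≥ 2 then
      let p := pvConsume i rest
      (i + 1, if p.1 = n - 1 then 128 else p.1 + 1) :: pvAltGo n (p.1 + 1) p.2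
    else pvAltGo n (i + 1) rest
termination_by xs.length
decreasing_by
  · exact Nat.lt_succ_of_le (pvConsume_length_le _ _)
  · exact Nat.lt_succ_self _

def find_overlaps_alt (coverage : List Int) : List (Int × Int) :=
  pvAltGo (coverage.length) 0 coverage

-- ===== PRECONDITION & SPEC =====
def Spec_find_overlaps (coverage : List Int) (out : List (Int × Int)) : Prop := out = find_overlaps_alt coverage
instance (coverage : List Int) (out : List (Int × Int)) : Decidable (Spec_find_overlaps coverage out) := by unfold Spec_find_overlaps; infer_instance

-- ===== CLAIM (what is proved, stated in full; the proofs are below) =====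
def Claim_equal_find_overlaps : Prop := ∀ (coverage : List Int), Dom_find_overlaps coverage → Spec_find_overlaps coverage (find_overlaps coverage)

-- ===== LEMMAS AND PROOFS =====

-- finalize A's loop state (the trailing 'if in_ovl' flush)
def pvFin (st : List (Int × Int) × Bool × Int) : List (Int × Int) :=
  if st.2.1 = true then st.1 ++ [(st.2.2, 128)] else st.1

-- the run-continuation that B performs while inside a run whose last seen index is i - 1 and start is s
def pvRun (n : Int) (i s : Int) (xs : List Int) : List (Int × Int) :=
  let p := pvConsume (i - 1) xs
  (s, if p.1 = n - 1 then 128 else p.1 + 1) :: pvAltGo n (p.1 + 1) p.2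

-- joint loop invariant for A's fold vs B's run-finder, both statements at once
theorem pv_main : ∀ (xs : List Int) (i : Int) (acc : List (Int × Int)) (s : Int),
    (pvFin ((PySem.List.enumerate xs i).foldl pvStepA (acc, false, s))
        = acc ++ pvAltGo (i + xs.length) i xs)
    ∧ (pvFin ((PySem.List.enumerate xs i).foldl pvStepA (acc, true, s))
        = acc ++ pvRun (i + xs.length) i s xs) := by
  intro xs
  induction xs with
  | nil =>
    intro i acc s
    constructor
    · simp [PySem.List.enumerate, pvFin, pvAltGo]
    · simp [PySem.List.enumerate, pvFin, pvRun, pvConsume, pvAltGo]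
  | cons c rest ih =>
    intro i acc s
    have hn : i + ((rest.length : Int) + 1) = (i + 1) + rest.length := by ring
    constructor
    · -- not currently in a run
      rw [PySem.List.enumerate_cons]
      by_cases hc : c ≥ 2
      · -- enter a run starting at i + 1
        simp only [List.foldl_cons, pvStepA, hc, true_and]
        norm_num
        rw [(ih (i + 1) acc (i + 1)).2]
        try simp only [List.length_cons]
        rw [hn]
        simp only [pvAltGo, pvRun]
        rw [if_pos hc, show i + 1 - 1 = i by ring]
      · -- skip this element
        have hc' : c < 2 := lt_of_not_ge hc
        simp only [List.foldl_cons, pvStepA, hc]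
        norm_num
        rw [(ih (i + 1) acc s).1]
        try simp only [List.length_cons]
        rw [hn]
        simp only [pvAltGo]
        rw [if_neg hc]
    · -- currently inside a run started at s, last run index i - 1
      rw [PySem.List.enumerate_cons]
      by_cases hc : c ≥ 2
      · -- run continues
        have h1 : ¬ (c ≥ 2 ∧ (true : Bool) = false) := by simp
        simp only [List.foldl_cons, pvStepA]
        rw [if_neg h1, if_neg (by simp; omega : ¬ (c < 2 ∧ True))]
        rw [(ih (i + 1) acc s).2]
        try simp only [List.length_cons]
        push_cast
        rw [hn]
        simp only [pvRun, pvConsume]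
        rw [if_pos hc, show i - 1 + 1 = i by ring, show i + 1 - 1 = i by ring]
      · -- run closes here: A appends (s, i); B's consume stops at i - 1
        have hc' : c < 2 := lt_of_not_ge hc
        have h1 : ¬ (c ≥ 2 ∧ (true : Bool) = false) := by simp
        simp only [List.foldl_cons, pvStepA]
        rw [if_neg h1, if_pos (by simp [hc'] : (c < 2 ∧ True))]
        rw [(ih (i + 1) (acc ++ [(s, i + 1 - 1)]) s).1]
        try simp only [List.length_cons]
        push_cast
        rw [hn]
        simp only [pvRun, pvConsume]
        rw [if_neg hc]
        have hne : ¬ (i - 1 = (i + 1) + (rest.length : Int) - 1) := by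
          have : (0 : Int) ≤ rest.length := Int.natCast_nonneg _
          omega
        rw [if_neg hne, show i - 1 + 1 = i by ring, show i + 1 - 1 = i by ring]
        simp only [pvAltGo]
        rw [if_neg hc]
        simp [List.append_assoc]
  -- (the two halves are proved together since each step may hand control to the other)

-- ===== VERDICT (by name: the statement is the Claim_ definition above) =====
theorem find_overlaps_spec : Claim_equal_find_overlaps := by
  intro coverage _
  unfold Spec_find_overlaps find_overlaps find_overlaps_alt
  have h := (pv_main coverage 0 [] 0).1
  simpa [pvFin] using h
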